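-- pv_equiv track=rewrite | github.com/ithinkitskevin/ai_mp3 | mp440.py | is_terminal_state
-- ===== SOURCE A (Python) =====
-- def isValid(row, state_y_len, col, state_x_len):
--     return row >= 0 and row < state_y_len and col >= 0 and col < state_x_len
--
-- def get_move_value(state, player, row, column):
--     flipped = 0
--     # Your implementation goes here
--     state_y_len = mul = len(state)
--     state_x_len = len(state[0])
--
--     poss_dir_list = ((-1,0), (-1, -1), (-1, 1), (0, -1), (0, 1), (1,1), (1,0), (1,-1))
--
--     for poss_dir in poss_dir_list:
--         # for a direction, check until the very end
--         loc_flip = 0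
--         own_piece_in_way = False
--
--         for ranged in range(1, mul+1):
--             new_dir_row = poss_dir[0] * ranged
--             new_dir_col = poss_dir[1] * ranged
--
--             app_row = new_dir_row + row
--             app_col = new_dir_col + column
--
--             if isValid(app_row, state_y_len, app_col, state_x_len):
--                 if player == 'B':
--                     # Player 1, so look for all whites
--                     if state[app_row][app_col] == 'W':
--                         loc_flip += 1
--                     if state[app_row][app_col] == 'B':
--                         own_piece_in_way = True
--                         break
--                 elif player == 'W':
--                     # Player 2, so look for all blacks
--                     if state[app_row][app_col] == 'B':
--                         loc_flip += 1
--                     if state[app_row][app_col] == 'W':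
--                         own_piece_in_way = True
--                         break
--             else:
--                 break
--
--         if own_piece_in_way:
--             flipped += loc_flip
--
--     return flipped
--
-- def count_pieces(state):
--     blackpieces = 0
--     whitepieces = 0
--     # Your implementation goes here
--     for row in state:
--         for col in row:
--             if col == 'W':
--                 whitepieces += 1
--             elif col == 'B':
--                 blackpieces += 1
--
--     return (blackpieces, whitepieces)
--
-- def is_terminal_state(state, state_list = None):
--     terminal = True
--     # Your implementation goes here
--     curr_pieces = count_pieces(state)
--     for row_ind, row in enumerate(state):
--         for col_ind, col in enumerate(row):
--             if col == ' ':
--                 if (get_move_value(state, 'B', row_ind, col_ind) == 0) and (get_move_value(state, 'W', row_ind, col_ind) == 0):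
--                     terminal = True
--                 else:
--                     return False
--     return terminal
-- ===== SOURCE B (Python) =====
-- def is_terminal_state(state, state_list=None):
--     # A blank is playable (for either player) iff some of the 8 rays from it
--     # contains both a 'B' and a 'W' within len(state) steps; no flip counting needed.
--     n = len(state)
--     w = len(state[0]) if state else 0
--     dirs = ((-1, 0), (-1, -1), (-1, 1), (0, -1), (0, 1), (1, 1), (1, 0), (1, -1))
--
--     def ray_has_both(r, c, dr, dc):
--         seen_b = seen_w = False
--         for k in range(1, n + 1):
--             rr, cc = r + dr * k, c + dc * k
--             if not (0 <= rr < n and 0 <= cc < w):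
--                 return False
--             x = state[rr][cc]
--             seen_b = seen_b or x == 'B'
--             seen_w = seen_w or x == 'W'
--             if seen_b and seen_w:
--                 return True
--         return False
--
--     return not any(ch == ' ' and any(ray_has_both(r, c, dr, dc) for dr, dc in dirs)
--                    for r, row in enumerate(state) for c, ch in enumerate(row))
-- ===== Notes on version B (the rewrite author's own statement) =====
-- stated objective: alternative
-- what changed: B drops the unused piece count and replaces A's two per-player flip-counting scans of every ray from each blank cell with a single player-agnostic two-flag walk per ray that early-exits as soon as both colours are seen (a blank is playable iff some ray holds both a 'B' and a 'W' within len(state) steps), short-circuiting the whole search at the first playable blank.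
-- outside the precondition, e.g. on is_terminal_state(['  ', 'W W', '..BBW', 'B'], None): A returns False, B returns False
import Mathlib
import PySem

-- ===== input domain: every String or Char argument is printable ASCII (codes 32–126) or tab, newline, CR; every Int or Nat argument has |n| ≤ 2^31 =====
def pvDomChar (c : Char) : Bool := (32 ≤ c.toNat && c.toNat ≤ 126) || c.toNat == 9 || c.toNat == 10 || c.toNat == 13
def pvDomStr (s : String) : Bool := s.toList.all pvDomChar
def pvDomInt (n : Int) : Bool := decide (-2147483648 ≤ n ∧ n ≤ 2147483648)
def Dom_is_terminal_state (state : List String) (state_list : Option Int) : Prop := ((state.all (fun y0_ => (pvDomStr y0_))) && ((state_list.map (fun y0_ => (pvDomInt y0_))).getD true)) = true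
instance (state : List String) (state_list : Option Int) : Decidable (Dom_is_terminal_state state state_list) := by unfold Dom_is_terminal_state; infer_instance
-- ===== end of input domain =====

-- B replaces A's two per-player flip-counting scans of every ray from each blank cell by a
-- single player-agnostic walk per ray that stops as soon as both colours have been seen
-- (a blank is playable iff some ray holds both a 'B' and a 'W' within len(state) steps),
-- and drops A's unused piece count; objective: alternative (a different characterisation of playability).

-- ===== PORT A =====
def pvAvalid (row ylen col xlen : Int) : Bool :=
  decide (row ≥ 0) && decide (row < ylen) && decide (col ≥ 0) && decide (col < xlen)

-- state[r][c]; the default '?' is only reachable where the Python raises (outside Pre_)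
def pvAchar (state : List String) (r c : Int) : Char :=
  (PySem.Str.pyGet? ((PySem.List.pyGet? state r).getD "") c).getD '?'

def pvAdirs : List (Int × Int) :=
  [(-1,0), (-1,-1), (-1,1), (0,-1), (0,1), (1,1), (1,0), (1,-1)]

-- the inner 'for ranged in range(1, mul+1)' loop of get_move_value (returns (loc_flip, own_piece_in_way))
def pvAstep (state : List String) (player : String) (row col dr dc ylen xlen : Int) :
    List Int → Int → Int × Bool
  | [], flip => (flip, false)
  | k :: rest, flip =>
    let app_row := dr * k + row
    let app_col := dc * k + col
    if pvAvalid app_row ylen app_col xlen then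
      if player == "B" then
        let ch := pvAchar state app_row app_col
        let flip1 := if ch == 'W' then flip + 1 else flip
        if ch == 'B' then (flip1, true)
        else pvAstep state player row col dr dc ylen xlen rest flip1
      else if player == "W" then
        let ch := pvAchar state app_row app_col
        let flip1 := if ch == 'B' then flip + 1 else flip
        if ch == 'W' then (flip1, true)
        else pvAstep state player row col dr dc ylen xlen rest flip1
      else pvAstep state player row col dr dc ylen xlen rest flip
    else (flip, false)

def pvA_get_move_value (state : List String) (player : String) (row column : Int) : Int :=
  let ylen : Int := (state.length : Int)
  let mul : Int := ylen
  let xlen : Int := PySem.Str.len ((PySem.List.pyGet? state 0).getD "")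
  pvAdirs.foldl (fun flipped d =>
    let res := pvAstep state player row column d.1 d.2 ylen xlen
      (PySem.List.pyRange 1 (mul + 1) 1) 0
    if res.2 then flipped + res.1 else flipped) 0

def pvA_count_pieces (state : List String) : Int × Int :=
  state.foldl (fun acc row =>
    row.toList.foldl (fun (bw : Int × Int) col =>
      if col == 'W' then (bw.1, bw.2 + 1)
      else if col == 'B' then (bw.1 + 1, bw.2)
      else bw) acc) (0, 0)

-- inner 'for col_ind, col in enumerate(row)' loop of is_terminal_state
def pvA_cols (state : List String) (row_ind : Int) : List (Int × Char) → Bool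
  | [] => true
  | (col_ind, col) :: rest =>
    if col == ' ' then
      if (pvA_get_move_value state "B" row_ind col_ind == 0)
          && (pvA_get_move_value state "W" row_ind col_ind == 0) then
        pvA_cols state row_ind rest
      else false
    else pvA_cols state row_ind rest

def pvA_rows (state : List String) : List (Int × String) → Bool
  | [] => true
  | (row_ind, row) :: rest =>
    if pvA_cols state row_ind (PySem.List.enumerate row.toList 0) then pvA_rows state rest
    else false

def is_terminal_state (state : List String) (state_list : Option Int) : Bool :=
  let _curr_pieces := pvA_count_pieces state
  pvA_rows state (PySem.List.enumerate state 0)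

-- ===== PORT B =====
def pvBchar (state : List String) (r c : Int) : Char :=
  (PySem.Str.pyGet? ((PySem.List.pyGet? state r).getD "") c).getD '?'

def pvBdirs : List (Int × Int) :=
  [(-1,0), (-1,-1), (-1,1), (0,-1), (0,1), (1,1), (1,0), (1,-1)]

-- ray_has_both: walk one ray keeping two flags, stop at a wall or once both colours are seen
def pvBray (state : List String) (n w r c dr dc : Int) : List Int → Bool → Bool → Bool
  | [], _, _ => false
  | k :: rest, sb, sw =>
    let rr := r + dr * k
    let cc := c + dc * k
    if decide (0 ≤ rr) && decide (rr < n) && decide (0 ≤ cc) && decide (cc < w) then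
      let x := pvBchar state rr cc
      let sb1 := sb || x == 'B'
      let sw1 := sw || x == 'W'
      if sb1 && sw1 then true
      else pvBray state n w r c dr dc rest sb1 sw1
    else false

def pvBplayable (state : List String) (n w r c : Int) : Bool :=
  pvBdirs.any fun d =>
    pvBray state n w r c d.1 d.2 (PySem.List.pyRange 1 (n + 1) 1) false false

def pvBrowScan (state : List String) (n w r : Int) : Int → List Char → Bool
  | _, [] => false
  | c, ch :: rest =>
    (ch == ' ' && pvBplayable state n w r c) || pvBrowScan state n w r (c + 1) rest

def pvBscan (state : List String) (n w : Int) : Int → List String → Bool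
  | _, [] => false
  | r, row :: rest => pvBrowScan state n w r 0 row.toList || pvBscan state n w (r + 1) rest

def is_terminal_state_alt (state : List String) (state_list : Option Int) : Bool :=
  let n : Int := (state.length : Int)
  let w : Int := match state with | [] => 0 | s :: _ => PySem.Str.len s
  !(pvBscan state n w 0 state)

-- ===== PRECONDITION & SPEC =====
-- Pre_ excludes boards that contain a blank and a row shorter than the first row: on those the
-- Python A may raise IndexError when a ray indexes past the end of a short row; on the ones
-- where an early `return False` (or a lucky ray) avoids the short row A returns and agrees
-- with B (see the cite).
def Pre_is_terminal_state (state : List String) (state_list : Option Int) : Prop :=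
  (∀ s ∈ state, (state.headD "").length ≤ s.length) ∨ (∀ s ∈ state, ' ' ∉ s.toList)

instance (state : List String) (state_list : Option Int) :
    Decidable (Pre_is_terminal_state state state_list) := by
  unfold Pre_is_terminal_state; infer_instance

def pvWitness_is_terminal_state : List String × Option Int := (["BW", " B"], none)

def Spec_is_terminal_state (state : List String) (state_list : Option Int) (out : Bool) : Prop := out = is_terminal_state_alt state state_list
instance (state : List String) (state_list : Option Int) (out : Bool) : Decidable (Spec_is_terminal_state state state_list out) := by unfold Spec_is_terminal_state; infer_instance

-- ===== CLAIM (what is proved, stated in full; the proofs are below) =====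
def Claim_equal_is_terminal_state : Prop := ∀ (state : List String) (state_list : Option Int), Dom_is_terminal_state state state_list → Pre_is_terminal_state state state_list → Spec_is_terminal_state state state_list (is_terminal_state state state_list)

-- ===== LEMMAS AND PROOFS =====

-- the characters of the maximal in-bounds prefix of a ray
def pvCells (state : List String) (n w r c dr dc : Int) : List Int → List Char
  | [] => []
  | k :: rest =>
    if decide (0 ≤ r + dr * k) && decide (r + dr * k < n) && decide (0 ≤ c + dc * k)
        && decide (c + dc * k < w) then
      pvBchar state (r + dr * k) (c + dc * k) :: pvCells state n w r c dr dc rest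
    else []

-- number of cnt-pieces strictly before the first stop-piece
def pvCnt (stop cnt : Char) : List Char → Int
  | [] => 0
  | x :: rest => if x == stop then 0 else (if x == cnt then 1 else 0) + pvCnt stop cnt rest

theorem pvBeqSymm (a b : Char) : (a == b) = (b == a) := by
  by_cases h : a = b
  · subst h; rfl
  · have h2 : ¬ b = a := fun e => h e.symm
    simp [h, h2]

theorem pvCnt_nonneg (stop cnt : Char) (cs : List Char) : 0 ≤ pvCnt stop cnt cs := by
  induction cs with
  | nil => simp [pvCnt]
  | cons x rest ih => simp only [pvCnt]; split_ifs <;> omega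

set_option maxRecDepth 4096 in
theorem pvBray_eq_cells (state : List String) (n w r c dr dc : Int)
    (ks : List Int) (sb sw : Bool) :
    pvBray state n w r c dr dc ks sb sw
      = (!(pvCells state n w r c dr dc ks).isEmpty
          && (sb || (pvCells state n w r c dr dc ks).contains 'B')
          && (sw || (pvCells state n w r c dr dc ks).contains 'W')) := by
  induction ks generalizing sb sw with
  | nil => simp [pvBray, pvCells]
  | cons k rest ih =>
    simp only [pvBray, pvCells]
    by_cases hin : (decide (0 ≤ r + dr * k) && decide (r + dr * k < n) && decide (0 ≤ c + dc * k)
        && decide (c + dc * k < w)) = true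
    · rw [if_pos hin, if_pos hin, ih]
      simp only [List.isEmpty_cons, List.contains_cons, Bool.not_false]
      rw [pvBeqSymm 'B' (pvBchar state (r + dr * k) (c + dc * k)),
          pvBeqSymm 'W' (pvBchar state (r + dr * k) (c + dc * k))]
      have hE : (pvCells state n w r c dr dc rest).isEmpty = true →
          ((pvCells state n w r c dr dc rest).contains 'B' = false ∧
           (pvCells state n w r c dr dc rest).contains 'W' = false) := by
        cases hcs : pvCells state n w r c dr dc rest <;> simp
      generalize (pvBchar state (r + dr * k) (c + dc * k) == 'B') = A at *
      generalize (pvBchar state (r + dr * k) (c + dc * k) == 'W') = W at *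
      generalize (pvCells state n w r c dr dc rest).contains 'B' = CB at *
      generalize (pvCells state n w r c dr dc rest).contains 'W' = CW at *
      generalize (pvCells state n w r c dr dc rest).isEmpty = E at *
      cases A <;> cases W <;> cases CB <;> cases CW <;> cases E <;> cases sb <;> cases sw <;>
        simp_all
    · rw [if_neg hin, if_neg hin]
      simp

theorem pvValid_eq (x n y w : Int) :
    pvAvalid x n y w
      = (decide (0 ≤ x) && decide (x < n) && decide (0 ≤ y) && decide (y < w)) := by
  simp [pvAvalid, ge_iff_le]

theorem pvAstep_eq_cells_B (state : List String) (n w r c dr dc : Int)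
    (ks : List Int) (f : Int) :
    pvAstep state "B" r c dr dc n w ks f
      = (f + pvCnt 'B' 'W' (pvCells state n w r c dr dc ks),
         (pvCells state n w r c dr dc ks).contains 'B') := by
  induction ks generalizing f with
  | nil => simp [pvAstep, pvCells, pvCnt]
  | cons k rest ih =>
    simp only [pvAstep, pvCells]
    have e1 : dr * k + r = r + dr * k := by ring
    have e2 : dc * k + c = c + dc * k := by ring
    rw [e1, e2, pvValid_eq]
    by_cases hin : (decide (0 ≤ r + dr * k) && decide (r + dr * k < n) && decide (0 ≤ c + dc * k)
        && decide (c + dc * k < w)) = true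
    · rw [if_pos hin, if_pos hin]
      have hx : pvAchar state (r + dr * k) (c + dc * k)
          = pvBchar state (r + dr * k) (c + dc * k) := rfl
      simp only [String.reduceBEq, if_true, hx]
      set x := pvBchar state (r + dr * k) (c + dc * k) with hxdef
      by_cases hB : (x == 'B') = true
      · have hxB := eq_of_beq hB
        rw [if_pos hB, hxB]
        simp [pvCnt]
      · rw [if_neg hB, ih]
        simp only [pvCnt, List.contains_cons, pvBeqSymm 'B' x]
        rw [if_neg hB]
        have hB' : (x == 'B') = false := by simpa using hB
        by_cases hW : (x == 'W') = true
        · simp only [hW, if_true, Prod.mk.injEq, hB', Bool.false_or]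
          exact ⟨by omega, trivial⟩
        · have hW' : (x == 'W') = false := by simpa using hW
          simp only [hW', Bool.false_eq_true, if_false, Prod.mk.injEq, hB', Bool.false_or]
          exact ⟨by omega, trivial⟩
    · rw [if_neg hin, if_neg hin]
      simp [pvCnt]

theorem pvAstep_eq_cells_W (state : List String) (n w r c dr dc : Int)
    (ks : List Int) (f : Int) :
    pvAstep state "W" r c dr dc n w ks f
      = (f + pvCnt 'W' 'B' (pvCells state n w r c dr dc ks),
         (pvCells state n w r c dr dc ks).contains 'W') := by
  induction ks generalizing f with
  | nil => simp [pvAstep, pvCells, pvCnt]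
  | cons k rest ih =>
    simp only [pvAstep, pvCells]
    have e1 : dr * k + r = r + dr * k := by ring
    have e2 : dc * k + c = c + dc * k := by ring
    rw [e1, e2, pvValid_eq]
    by_cases hin : (decide (0 ≤ r + dr * k) && decide (r + dr * k < n) && decide (0 ≤ c + dc * k)
        && decide (c + dc * k < w)) = true
    · rw [if_pos hin, if_pos hin]
      have hx : pvAchar state (r + dr * k) (c + dc * k)
          = pvBchar state (r + dr * k) (c + dc * k) := rfl
      simp only [String.reduceBEq, Bool.false_eq_true, if_false, if_true, hx]
      set x := pvBchar state (r + dr * k) (c + dc * k) with hxdef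
      by_cases hW : (x == 'W') = true
      · have hxW := eq_of_beq hW
        rw [if_pos hW, hxW]
        simp [pvCnt]
      · rw [if_neg hW, ih]
        simp only [pvCnt, List.contains_cons, pvBeqSymm 'W' x]
        rw [if_neg hW]
        have hW' : (x == 'W') = false := by simpa using hW
        by_cases hB : (x == 'B') = true
        · simp only [hB, if_true, Prod.mk.injEq, hW', Bool.false_or]
          exact ⟨by omega, trivial⟩
        · have hB' : (x == 'B') = false := by simpa using hB
          simp only [hB', Bool.false_eq_true, if_false, Prod.mk.injEq, hW', Bool.false_or]
          exact ⟨by omega, trivial⟩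
    · rw [if_neg hin, if_neg hin]
      simp [pvCnt]

theorem pvChars_equiv (cs : List Char) :
    ((cs.contains 'B' = true ∧ 0 < pvCnt 'B' 'W' cs)
      ∨ (cs.contains 'W' = true ∧ 0 < pvCnt 'W' 'B' cs))
    ↔ (cs.contains 'B' = true ∧ cs.contains 'W' = true) := by
  induction cs with
  | nil => simp [pvCnt]
  | cons x rest ih =>
    by_cases hB : x = 'B'
    · subst hB
      have h := pvCnt_nonneg 'W' 'B' rest
      simp [pvCnt]
      omega
    · by_cases hW : x = 'W'
      · subst hW
        have h := pvCnt_nonneg 'B' 'W' rest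
        simp [pvCnt]
        omega
      · have hB' : ('B' == x) = false := by simp; exact fun e => hB e.symm
        have hW' : ('W' == x) = false := by simp; exact fun e => hW e.symm
        have hB2 : (x == 'B') = false := by simp [hB]
        have hW2 : (x == 'W') = false := by simp [hW]
        simp only [pvCnt, List.contains_cons, hB', hW', hB2, hW2, Bool.false_or,
          Bool.false_eq_true, if_false, zero_add]
        exact ih

theorem pvDir_equiv (state : List String) (n w r c dr dc : Int) (ks : List Int) :
    (((if (pvAstep state "B" r c dr dc n w ks 0).2 then (pvAstep state "B" r c dr dc n w ks 0).1 else 0) = 0)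
      ∧ ((if (pvAstep state "W" r c dr dc n w ks 0).2 then (pvAstep state "W" r c dr dc n w ks 0).1 else 0) = 0))
      ↔ pvBray state n w r c dr dc ks false false = false := by
  rw [pvAstep_eq_cells_B, pvAstep_eq_cells_W, pvBray_eq_cells]
  set cs := pvCells state n w r c dr dc ks with hcs
  have h1 := pvCnt_nonneg 'B' 'W' cs
  have h2 := pvCnt_nonneg 'W' 'B' cs
  have h3 := pvChars_equiv cs
  have h4 : cs.contains 'B' = true → cs.isEmpty = false := by cases cs <;> simp_all
  cases hCB : cs.contains 'B' <;> cases hCW : cs.contains 'W' <;> simp_all <;> omega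

-- a foldl that conditionally adds is the sum of its conditional contributions
theorem pvFold_sum (f : Int × Int → Int × Bool) (L : List (Int × Int)) (init : Int) :
    L.foldl (fun acc d => if (f d).2 then acc + (f d).1 else acc) init
      = init + (L.map (fun d => if (f d).2 then (f d).1 else 0)).sum := by
  induction L generalizing init with
  | nil => simp
  | cons d rest ih =>
    simp only [List.foldl_cons, List.map_cons, List.sum_cons, ih]
    split_ifs <;> omega

theorem pvDirs_equiv (state : List String) (n w r c : Int) (ks : List Int)
    (ds : List (Int × Int)) :
    (((ds.map (fun d => if (pvAstep state "B" r c d.1 d.2 n w ks 0).2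
          then (pvAstep state "B" r c d.1 d.2 n w ks 0).1 else 0)).sum = 0)
      ∧ ((ds.map (fun d => if (pvAstep state "W" r c d.1 d.2 n w ks 0).2
          then (pvAstep state "W" r c d.1 d.2 n w ks 0).1 else 0)).sum = 0))
      ↔ (ds.any fun d => pvBray state n w r c d.1 d.2 ks false false) = false := by
  induction ds with
  | nil => simp
  | cons d rest ih =>
    simp only [List.map_cons, List.sum_cons, List.any_cons, Bool.or_eq_false_iff]
    have hd := pvDir_equiv state n w r c d.1 d.2 ks
    have hnB : 0 ≤ (if (pvAstep state "B" r c d.1 d.2 n w ks 0).2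
        then (pvAstep state "B" r c d.1 d.2 n w ks 0).1 else 0) := by
      rw [pvAstep_eq_cells_B]; split_ifs <;> simp [pvCnt_nonneg]
    have hnW : 0 ≤ (if (pvAstep state "W" r c d.1 d.2 n w ks 0).2
        then (pvAstep state "W" r c d.1 d.2 n w ks 0).1 else 0) := by
      rw [pvAstep_eq_cells_W]; split_ifs <;> simp [pvCnt_nonneg]
    have hsB : 0 ≤ ((rest.map (fun d => if (pvAstep state "B" r c d.1 d.2 n w ks 0).2
        then (pvAstep state "B" r c d.1 d.2 n w ks 0).1 else 0)).sum) := by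
      apply List.sum_nonneg
      intro x hx
      simp only [List.mem_map] at hx
      obtain ⟨d', _, rfl⟩ := hx
      rw [pvAstep_eq_cells_B]; split_ifs <;> simp [pvCnt_nonneg]
    have hsW : 0 ≤ ((rest.map (fun d => if (pvAstep state "W" r c d.1 d.2 n w ks 0).2
        then (pvAstep state "W" r c d.1 d.2 n w ks 0).1 else 0)).sum) := by
      apply List.sum_nonneg
      intro x hx
      simp only [List.mem_map] at hx
      obtain ⟨d', _, rfl⟩ := hx
      rw [pvAstep_eq_cells_W]; split_ifs <;> simp [pvCnt_nonneg]
    constructor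
    · intro ⟨hb, hw2⟩
      exact ⟨hd.mp ⟨by omega, by omega⟩, ih.mp ⟨by omega, by omega⟩⟩
    · intro ⟨h5, h6⟩
      obtain ⟨e1, e2⟩ := hd.mpr h5
      obtain ⟨e3, e4⟩ := ih.mpr h6
      omega

theorem pvCell_equiv (state : List String) (r c : Int) :
    ((pvA_get_move_value state "B" r c == 0) && (pvA_get_move_value state "W" r c == 0))
      = !(pvBplayable state (state.length : Int)
            (PySem.Str.len ((PySem.List.pyGet? state 0).getD "")) r c) := by
  have hgB : pvA_get_move_value state "B" r c
      = ((pvAdirs.map (fun d => if (pvAstep state "B" r c d.1 d.2 (state.length : Int)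
          (PySem.Str.len ((PySem.List.pyGet? state 0).getD ""))
          (PySem.List.pyRange 1 ((state.length : Int) + 1) 1) 0).2
        then (pvAstep state "B" r c d.1 d.2 (state.length : Int)
          (PySem.Str.len ((PySem.List.pyGet? state 0).getD ""))
          (PySem.List.pyRange 1 ((state.length : Int) + 1) 1) 0).1 else 0)).sum) := by
    unfold pvA_get_move_value
    rw [pvFold_sum (fun d => pvAstep state "B" r c d.1 d.2 (state.length : Int)
      (PySem.Str.len ((PySem.List.pyGet? state 0).getD ""))
      (PySem.List.pyRange 1 ((state.length : Int) + 1) 1) 0) pvAdirs 0]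
    omega
  have hgW : pvA_get_move_value state "W" r c
      = ((pvAdirs.map (fun d => if (pvAstep state "W" r c d.1 d.2 (state.length : Int)
          (PySem.Str.len ((PySem.List.pyGet? state 0).getD ""))
          (PySem.List.pyRange 1 ((state.length : Int) + 1) 1) 0).2
        then (pvAstep state "W" r c d.1 d.2 (state.length : Int)
          (PySem.Str.len ((PySem.List.pyGet? state 0).getD ""))
          (PySem.List.pyRange 1 ((state.length : Int) + 1) 1) 0).1 else 0)).sum) := by
    unfold pvA_get_move_value
    rw [pvFold_sum (fun d => pvAstep state "W" r c d.1 d.2 (state.length : Int)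
      (PySem.Str.len ((PySem.List.pyGet? state 0).getD ""))
      (PySem.List.pyRange 1 ((state.length : Int) + 1) 1) 0) pvAdirs 0]
    omega
  have hiff := pvDirs_equiv state (state.length : Int)
    (PySem.Str.len ((PySem.List.pyGet? state 0).getD "")) r c
    (PySem.List.pyRange 1 ((state.length : Int) + 1) 1) pvAdirs
  have hdirs : pvBdirs = pvAdirs := rfl
  unfold pvBplayable
  rw [hdirs, hgB, hgW]
  set SB := (pvAdirs.map (fun d => if (pvAstep state "B" r c d.1 d.2 (state.length : Int)
      (PySem.Str.len ((PySem.List.pyGet? state 0).getD ""))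
      (PySem.List.pyRange 1 ((state.length : Int) + 1) 1) 0).2
    then (pvAstep state "B" r c d.1 d.2 (state.length : Int)
      (PySem.Str.len ((PySem.List.pyGet? state 0).getD ""))
      (PySem.List.pyRange 1 ((state.length : Int) + 1) 1) 0).1 else 0)).sum with hSB
  set SW := (pvAdirs.map (fun d => if (pvAstep state "W" r c d.1 d.2 (state.length : Int)
      (PySem.Str.len ((PySem.List.pyGet? state 0).getD ""))
      (PySem.List.pyRange 1 ((state.length : Int) + 1) 1) 0).2
    then (pvAstep state "W" r c d.1 d.2 (state.length : Int)
      (PySem.Str.len ((PySem.List.pyGet? state 0).getD ""))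
      (PySem.List.pyRange 1 ((state.length : Int) + 1) 1) 0).1 else 0)).sum with hSW
  cases hp : (pvAdirs.any fun d => pvBray state (state.length : Int)
      (PySem.Str.len ((PySem.List.pyGet? state 0).getD "")) r c d.1 d.2
      (PySem.List.pyRange 1 ((state.length : Int) + 1) 1) false false) with
  | false =>
    obtain ⟨e1, e2⟩ := hiff.mpr hp
    rw [e1, e2]
    rfl
  | true =>
    simp only [Bool.not_true]
    cases hb : (SB == 0) with
    | false => simp
    | true =>
      cases hw2 : (SW == 0) with
      | false => simp
      | true =>
        have h0 := hiff.mp ⟨beq_iff_eq.mp hb, beq_iff_eq.mp hw2⟩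
        rw [h0] at hp
        exact absurd hp (by simp)

theorem pvCols_equiv (state : List String) (n w ri : Int)
    (hn : n = (state.length : Int))
    (hw : w = PySem.Str.len ((PySem.List.pyGet? state 0).getD ""))
    (cs : List Char) (ci : Int) :
    pvA_cols state ri (PySem.List.enumerate cs ci) = !(pvBrowScan state n w ri ci cs) := by
  induction cs generalizing ci with
  | nil => simp [PySem.List.enumerate_nil, pvA_cols, pvBrowScan]
  | cons ch rest ih =>
    rw [PySem.List.enumerate_cons]
    simp only [pvA_cols, pvBrowScan]
    by_cases hsp : (ch == ' ') = true
    · rw [if_pos hsp]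
      have hc := pvCell_equiv state ri ci
      rw [← hn, ← hw] at hc
      rw [hc, hsp]
      cases hp : pvBplayable state n w ri ci with
      | false => simp only [Bool.not_false, if_true, Bool.true_and, Bool.false_or]; exact ih ci.succ ▸ ih (ci + 1)
      | true => simp
    · have hsp' : (ch == ' ') = false := by simpa using hsp
      rw [if_neg hsp, hsp']
      simp only [Bool.false_and, Bool.false_or]
      exact ih (ci + 1)

theorem pvRows_equiv (state : List String) (n w : Int)
    (hn : n = (state.length : Int))
    (hw : w = PySem.Str.len ((PySem.List.pyGet? state 0).getD ""))
    (rows : List String) (ri : Int) :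
    pvA_rows state (PySem.List.enumerate rows ri) = !(pvBscan state n w ri rows) := by
  induction rows generalizing ri with
  | nil => simp [PySem.List.enumerate_nil, pvA_rows, pvBscan]
  | cons row rest ih =>
    rw [PySem.List.enumerate_cons]
    simp only [pvA_rows, pvBscan]
    rw [pvCols_equiv state n w ri hn hw row.toList 0]
    cases hs : pvBrowScan state n w ri 0 row.toList with
    | false => simp only [Bool.not_false, if_true, Bool.false_or]; exact ih (ri + 1)
    | true => simp

-- ===== VERDICT (by name: the statement is the Claim_ definition above) =====
theorem is_terminal_state_spec : Claim_equal_is_terminal_state := by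
  intro state state_list _hDom _hPre
  unfold Spec_is_terminal_state is_terminal_state is_terminal_state_alt
  cases state with
  | nil => rfl
  | cons s rest =>
    have hw2 : PySem.Str.len s = PySem.Str.len ((PySem.List.pyGet? (s :: rest) 0).getD "") := by
      rw [PySem.List.pyGet?_zero_cons]; rfl
    show pvA_rows (s :: rest) (PySem.List.enumerate (s :: rest) 0)
        = !(pvBscan (s :: rest) (((s :: rest).length : Nat) : Int) (PySem.Str.len s) 0 (s :: rest))
    rw [hw2]
    exact pvRows_equiv (s :: rest) (((s :: rest).length : Nat) : Int)
      (PySem.Str.len ((PySem.List.pyGet? (s :: rest) 0).getD "")) rfl rfl (s :: rest) 0
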